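-- pv_equiv track=rewrite | github.com/chandansgowda/leetcode-python | 2501-3000/2903.py | findIndices
-- ===== SOURCE A (Python) =====
-- from typing import List
--
-- def findIndices(nums: List[int], indexDifference: int, valueDifference: int) -> List[int]:
--     ans = [-1,-1]
--     for i in range(len(nums)):
--         for j in range(i, len(nums)):
--             if abs(i-j)>=indexDifference and abs(nums[i]-nums[j]) >= valueDifference:
--                 ans[0], ans[1] = i,j
--                 break
--     return ans
-- ===== SOURCE B (Python) =====
-- from typing import List
--
-- def findIndices(nums: List[int], indexDifference: int, valueDifference: int) -> List[int]:
--     n = len(nums)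
--     d = indexDifference if indexDifference > 0 else 0
--     mn = None
--     mx = None
--     for i in range(n - 1 - d, -1, -1):
--         x = nums[i + d]
--         if mn is None or x < mn:
--             mn = x
--         if mx is None or x > mx:
--             mx = x
--         if nums[i] + valueDifference <= mx or mn <= nums[i] - valueDifference:
--             for j in range(i + d, n):
--                 if abs(nums[i] - nums[j]) >= valueDifference:
--                     return [i, j]
--     return [-1, -1]
-- ===== Notes on version B (the rewrite author's own statement) =====
-- stated objective: faster
-- what changed: Replaces the nested O(n^2) scan (which keeps the last i that has a valid partner, with its first valid j) by a single descending pass that maintains a running min/max of the window nums[i+d:], detects in O(1) whether index i has a valid partner, and does one final linear scan for the first j of the first (= A's last) valid i.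
import Mathlib
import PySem

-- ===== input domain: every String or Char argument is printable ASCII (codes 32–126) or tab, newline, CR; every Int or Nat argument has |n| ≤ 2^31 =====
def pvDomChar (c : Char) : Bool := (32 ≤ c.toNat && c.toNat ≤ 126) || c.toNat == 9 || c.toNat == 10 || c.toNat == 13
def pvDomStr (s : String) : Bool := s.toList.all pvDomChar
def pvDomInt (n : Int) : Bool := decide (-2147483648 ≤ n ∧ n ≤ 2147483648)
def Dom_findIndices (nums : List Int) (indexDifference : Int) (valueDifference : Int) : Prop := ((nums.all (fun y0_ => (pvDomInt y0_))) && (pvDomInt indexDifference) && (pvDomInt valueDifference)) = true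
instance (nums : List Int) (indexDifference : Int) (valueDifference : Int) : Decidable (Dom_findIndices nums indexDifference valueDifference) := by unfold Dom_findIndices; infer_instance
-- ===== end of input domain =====

-- B replaces A's nested scan by one descending pass with a running min/max of the
-- window nums[i+d:], plus one final scan for the first j — measured faster.

-- ===== PORT A =====
-- inner 'for j in range(i, len(nums)): if …: ans = [i,j]; break'
def innerA (nums : List Int) (d v i : Int) (ans : List Int) : List Int → List Int
  | [] => ans
  | j :: rest =>
      if d ≤ |i - j| ∧ v ≤ |PySem.List.pyGetD nums i 0 - PySem.List.pyGetD nums j 0| then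
        [i, j]
      else innerA nums d v i ans rest

def findIndices (nums : List Int) (indexDifference : Int) (valueDifference : Int) : List Int :=
  (PySem.List.pyRange 0 (nums.length : Int) 1).foldl
    (fun ans i =>
      innerA nums indexDifference valueDifference i ans
        (PySem.List.pyRange i (nums.length : Int) 1))
    [-1, -1]

-- ===== PORT B =====
-- 'for i in range(n-1-d, -1, -1)' with running mn/mx (none = Python's None) and an
-- early 'return [i, j]'; the inner 'for j …: if …: return' is the find? scan.
def outerB (nums : List Int) (d v : Int) (mn mx : Option Int) : List Int → List Int
  | [] => [-1, -1]
  | i :: rest =>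
      let x := PySem.List.pyGetD nums (i + d) 0
      let mn' := match mn with | none => x | some m => if x < m then x else m
      let mx' := match mx with | none => x | some m => if x > m then x else m
      if PySem.List.pyGetD nums i 0 + v ≤ mx' ∨ mn' ≤ PySem.List.pyGetD nums i 0 - v then
        match (PySem.List.pyRange (i + d) (nums.length : Int) 1).find?
            (fun j => decide (v ≤ |PySem.List.pyGetD nums i 0 - PySem.List.pyGetD nums j 0|)) with
        | some j => [i, j]
        | none => outerB nums d v (some mn') (some mx') rest
      else outerB nums d v (some mn') (some mx') rest

def findIndices_alt (nums : List Int) (indexDifference : Int) (valueDifference : Int) : List Int :=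
  let d := if indexDifference > 0 then indexDifference else 0
  outerB nums d valueDifference none none
    (PySem.List.pyRange ((nums.length : Int) - 1 - d) (-1) (-1))

-- ===== PRECONDITION & SPEC =====
def Spec_findIndices (nums : List Int) (indexDifference : Int) (valueDifference : Int) (out : List Int) : Prop := out = findIndices_alt nums indexDifference valueDifference
instance (nums : List Int) (indexDifference : Int) (valueDifference : Int) (out : List Int) : Decidable (Spec_findIndices nums indexDifference valueDifference out) := by unfold Spec_findIndices; infer_instance

-- ===== CLAIM (what is proved, stated in full; the proofs are below) =====
def Claim_equal_findIndices : Prop := ∀ (nums : List Int) (indexDifference : Int) (valueDifference : Int), Dom_findIndices nums indexDifference valueDifference → Spec_findIndices nums indexDifference valueDifference (findIndices nums indexDifference valueDifference)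

-- ===== LEMMAS AND PROOFS =====

-- first valid j for index i, A's condition
def fA (nums : List Int) (d v i : Int) : Option Int :=
  (PySem.List.pyRange i (nums.length : Int) 1).find?
    (fun j => decide (d ≤ |i - j| ∧ v ≤ |PySem.List.pyGetD nums i 0 - PySem.List.pyGetD nums j 0|))

-- first valid j for index i, B's condition (window starts at i+d, d = max d0 0)
def fB (nums : List Int) (d v i : Int) : Option Int :=
  (PySem.List.pyRange (i + d) (nums.length : Int) 1).find?
    (fun j => decide (v ≤ |PySem.List.pyGetD nums i 0 - PySem.List.pyGetD nums j 0|))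

-- option min / max of a list (value of Python's running mn / mx)
def minI : List Int → Option Int
  | [] => none
  | x :: xs => some (xs.foldl min x)

def maxI : List Int → Option Int
  | [] => none
  | x :: xs => some (xs.foldl max x)

-- window values for index i
def wv (nums : List Int) (d i : Int) : List Int :=
  (PySem.List.pyRange (i + d) (nums.length : Int) 1).map (fun j => PySem.List.pyGetD nums j 0)

lemma find?_congr_mem {α : Type} (l : List α) (p q : α → Bool)
    (h : ∀ x ∈ l, p x = q x) : l.find? p = l.find? q := by
  induction l with
  | nil => rfl
  | cons a t ih =>
      simp only [List.find?]
      rw [h a List.mem_cons_self]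
      cases q a
      · exact ih fun x hx => h x (List.mem_cons_of_mem _ hx)
      · rfl

lemma findSome?_congr_mem {α β : Type} (l : List α) (f g : α → Option β)
    (h : ∀ x ∈ l, f x = g x) : l.findSome? f = l.findSome? g := by
  induction l with
  | nil => rfl
  | cons a t ih =>
      simp only [List.findSome?_cons]
      rw [h a List.mem_cons_self]
      cases g a
      · exact ih fun x hx => h x (List.mem_cons_of_mem _ hx)
      · rfl

lemma innerA_eq (nums : List Int) (d v i : Int) (ans : List Int) (js : List Int) :
    innerA nums d v i ans js
      = match js.find? (fun j => decide (d ≤ |i - j| ∧ v ≤ |PySem.List.pyGetD nums i 0 - PySem.List.pyGetD nums j 0|)) with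
        | some j => [i, j]
        | none => ans := by
  induction js with
  | nil => rfl
  | cons j rest ih =>
      by_cases h : d ≤ |i - j| ∧ v ≤ |PySem.List.pyGetD nums i 0 - PySem.List.pyGetD nums j 0|
      · simp [innerA, List.find?, h]
      · simp only [innerA, List.find?]
        rw [if_neg h, ih]
        simp only [decide_eq_true_eq] at *
        rw [decide_eq_false h]

lemma foldl_pick (h : Int → Option Int) (F : Int → Int → List Int) (l : List Int) (ans : List Int) :
    l.foldl (fun a i => match h i with | some j => F i j | none => a) ans
      = match l.reverse.findSome? (fun i => (h i).map (F i)) with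
        | some r => r
        | none => ans := by
  induction l generalizing ans with
  | nil => rfl
  | cons i rest ih =>
      simp only [List.foldl_cons, List.reverse_cons, List.findSome?_append]
      rw [ih]
      cases hr : rest.reverse.findSome? (fun i => (h i).map (F i)) with
      | some r => simp
      | none =>
          cases hi : h i with
          | some j => simp [List.findSome?, hi]
          | none => simp [List.findSome?, hi]

lemma foldl_min_shift (t : List Int) (a b : Int) :
    t.foldl min (min a b) = min a (t.foldl min b) := by
  induction t generalizing b with
  | nil => rfl
  | cons c t' ih => simp only [List.foldl_cons, min_assoc, ih]

lemma foldl_max_shift (t : List Int) (a b : Int) :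
    t.foldl max (max a b) = max a (t.foldl max b) := by
  induction t generalizing b with
  | nil => rfl
  | cons c t' ih => simp only [List.foldl_cons, max_assoc, ih]

lemma minI_cons (x : Int) (ws : List Int) :
    minI (x :: ws) = some (match minI ws with | none => x | some m => if x < m then x else m) := by
  cases ws with
  | nil => rfl
  | cons w t =>
      simp only [minI, List.foldl_cons]
      congr 1
      have h1 : (if x < t.foldl min w then x else t.foldl min w) = min x (t.foldl min w) := by
        rcases le_total x (t.foldl min w) with h | h <;> rw [min_def] <;> split_ifs <;> omega
      rw [h1, ← foldl_min_shift]

lemma maxI_cons (x : Int) (ws : List Int) :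
    maxI (x :: ws) = some (match maxI ws with | none => x | some m => if x > m then x else m) := by
  cases ws with
  | nil => rfl
  | cons w t =>
      simp only [maxI, List.foldl_cons]
      congr 1
      have h1 : (if x > t.foldl max w then x else t.foldl max w) = max x (t.foldl max w) := by
        rcases le_total x (t.foldl max w) with h | h <;> rw [max_def] <;> split_ifs <;> omega
      rw [h1, ← foldl_max_shift]

lemma minI_le {l : List Int} {m : Int} (h : minI l = some m) : ∀ y ∈ l, m ≤ y := by
  cases l with
  | nil => simp [minI] at h
  | cons x xs =>
      simp only [minI, Option.some.injEq] at h
      subst h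
      intro y hy
      rcases List.mem_cons.mp hy with rfl | hy
      · exact (PySem.List.foldl_min_le xs y).1
      · exact (PySem.List.foldl_min_le xs x).2 y hy

lemma le_maxI {l : List Int} {m : Int} (h : maxI l = some m) : ∀ y ∈ l, y ≤ m := by
  cases l with
  | nil => simp [maxI] at h
  | cons x xs =>
      simp only [maxI, Option.some.injEq] at h
      subst h
      intro y hy
      rcases List.mem_cons.mp hy with rfl | hy
      · exact (PySem.List.le_foldl_max xs y).1
      · exact (PySem.List.le_foldl_max xs x).2 y hy

lemma minI_mem {l : List Int} {m : Int} (h : minI l = some m) : m ∈ l := by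
  cases l with
  | nil => simp [minI] at h
  | cons x xs =>
      simp only [minI, Option.some.injEq] at h
      subst h
      rcases PySem.List.foldl_min_mem xs x with h1 | h1
      · rw [h1]; exact List.mem_cons_self
      · exact List.mem_cons_of_mem _ h1

lemma maxI_mem {l : List Int} {m : Int} (h : maxI l = some m) : m ∈ l := by
  cases l with
  | nil => simp [maxI] at h
  | cons x xs =>
      simp only [maxI, Option.some.injEq] at h
      subst h
      rcases PySem.List.foldl_max_mem xs x with h1 | h1
      · rw [h1]; exact List.mem_cons_self
      · exact List.mem_cons_of_mem _ h1

-- the O(1) window test is equivalent to the existence of a valid partner value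
lemma window_test (nums : List Int) (v i : Int) (ws : List Int) (mn mx : Int)
    (hmn : minI ws = some mn) (hmx : maxI ws = some mx) :
    ((PySem.List.pyGetD nums i 0 + v ≤ mx ∨ mn ≤ PySem.List.pyGetD nums i 0 - v) ↔ ∃ y ∈ ws, v ≤ |PySem.List.pyGetD nums i 0 - y|) := by
  constructor
  · rintro (h | h)
    · refine ⟨mx, maxI_mem hmx, ?_⟩
      rcases abs_cases (PySem.List.pyGetD nums i 0 - mx) with ⟨he, _⟩ | ⟨he, _⟩ <;> omega
    · refine ⟨mn, minI_mem hmn, ?_⟩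
      rcases abs_cases (PySem.List.pyGetD nums i 0 - mn) with ⟨he, _⟩ | ⟨he, _⟩ <;> omega
  · rintro ⟨y, hy, hv⟩
    have h1 := minI_le hmn y hy
    have h2 := le_maxI hmx y hy
    rcases abs_cases (PySem.List.pyGetD nums i 0 - y) with ⟨he, _⟩ | ⟨he, _⟩ <;> omega

lemma fB_isSome_iff (nums : List Int) (d v i : Int) :
    (fB nums d v i).isSome ↔ ∃ y ∈ wv nums d i, v ≤ |PySem.List.pyGetD nums i 0 - y| := by
  unfold fB wv
  rw [List.find?_isSome]
  constructor
  · rintro ⟨j, hj, hp⟩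
    exact ⟨PySem.List.pyGetD nums j 0, List.mem_map_of_mem hj, by simpa using hp⟩
  · rintro ⟨y, hy, hv⟩
    rcases List.mem_map.mp hy with ⟨j, hj, rfl⟩
    exact ⟨j, hj, by simpa using hv⟩

lemma fB_none_of_empty (nums : List Int) (d v i : Int)
    (h : (nums.length : Int) ≤ i + d) : fB nums d v i = none := by
  unfold fB
  rw [PySem.List.pyRange_one_eq_nil h]
  rfl

-- core invariant proof for B's loop: the descending pass returns the first hit
lemma outerB_eq (nums : List Int) (d v : Int) :
    ∀ (m : Nat) (k : Int), (k + 1).toNat ≤ m →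
      k + d < (nums.length : Int) →
      outerB nums d v (minI (wv nums d (k + 1))) (maxI (wv nums d (k + 1)))
          (PySem.List.pyRange k (-1) (-1))
        = match (PySem.List.pyRange k (-1) (-1)).findSome?
            (fun i => (fB nums d v i).map (fun j => [i, j])) with
          | some r => r
          | none => [-1, -1] := by
  intro m
  induction m with
  | zero =>
      intro k hm _
      rw [PySem.List.pyRange_neg_one_eq_nil (by omega)]
      rfl
  | succ m ih =>
      intro k hm hkd
      by_cases hk : k < 0
      · rw [PySem.List.pyRange_neg_one_eq_nil (by omega)]
        rfl
      push_neg at hk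
      rw [PySem.List.pyRange_neg_one_cons (by omega)]
      have hwv : wv nums d k = PySem.List.pyGetD nums (k + d) 0 :: wv nums d (k + 1) := by
        unfold wv
        rw [PySem.List.pyRange_one_cons (by omega), List.map_cons,
          show k + d + 1 = k + 1 + d by ring]
      have hk1 : k - 1 + 1 = k := by ring
      have main : ∀ (mnv mxv : Int),
          minI (wv nums d k) = some mnv → maxI (wv nums d k) = some mxv →
          (if PySem.List.pyGetD nums k 0 + v ≤ mxv ∨ mnv ≤ PySem.List.pyGetD nums k 0 - v then
            match (PySem.List.pyRange (k + d) (nums.length : Int) 1).find?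
                (fun j => decide (v ≤ |PySem.List.pyGetD nums k 0 - PySem.List.pyGetD nums j 0|)) with
            | some j => [k, j]
            | none => outerB nums d v (some mnv) (some mxv) (PySem.List.pyRange (k - 1) (-1) (-1))
          else outerB nums d v (some mnv) (some mxv) (PySem.List.pyRange (k - 1) (-1) (-1)))
          = match (k :: PySem.List.pyRange (k - 1) (-1) (-1)).findSome?
              (fun i => (fB nums d v i).map (fun j => [i, j])) with
            | some r => r
            | none => [-1, -1] := by
        intro mnv mxv hmn hmx
        have hrec : outerB nums d v (some mnv) (some mxv) (PySem.List.pyRange (k - 1) (-1) (-1))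
            = match (PySem.List.pyRange (k - 1) (-1) (-1)).findSome?
                (fun i => (fB nums d v i).map (fun j => [i, j])) with
              | some r => r
              | none => [-1, -1] := by
          have h0 := ih (k - 1) (by omega) (by omega)
          rw [hk1] at h0
          rw [hmn, hmx] at h0
          exact h0
        have hcnd : (PySem.List.pyGetD nums k 0 + v ≤ mxv ∨ mnv ≤ PySem.List.pyGetD nums k 0 - v)
            ↔ (fB nums d v k).isSome := by
          rw [fB_isSome_iff]
          exact window_test nums v k (wv nums d k) mnv mxv hmn hmx
        rw [List.findSome?_cons]
        by_cases hc : PySem.List.pyGetD nums k 0 + v ≤ mxv ∨ mnv ≤ PySem.List.pyGetD nums k 0 - v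
        · rw [if_pos hc]
          have hs : (fB nums d v k).isSome := hcnd.mp hc
          cases hj : fB nums d v k with
          | none => rw [hj] at hs; simp at hs
          | some j =>
              have hj' := hj
              unfold fB at hj'
              simp [hj', hj]
        · rw [if_neg hc]
          have hn : fB nums d v k = none := by
            cases hj : fB nums d v k with
            | none => rfl
            | some j => exact absurd (hcnd.mpr (by rw [hj]; rfl)) hc
          simp only [hn, Option.map_none]
          simpa using hrec
      rcases hw : wv nums d (k + 1) with _ | ⟨w, t⟩
      · have h1 : minI (wv nums d k) = some (PySem.List.pyGetD nums (k + d) 0) := by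
          rw [hwv, hw]; rfl
        have h2 : maxI (wv nums d k) = some (PySem.List.pyGetD nums (k + d) 0) := by
          rw [hwv, hw]; rfl
        have h3 := main _ _ h1 h2
        simpa only [outerB, minI, maxI] using h3
      · have h1 : minI (wv nums d k)
            = some (if PySem.List.pyGetD nums (k + d) 0 < t.foldl min w
                    then PySem.List.pyGetD nums (k + d) 0 else t.foldl min w) := by
          rw [hwv, hw, minI_cons]
          simp only [minI]
        have h2 : maxI (wv nums d k)
            = some (if PySem.List.pyGetD nums (k + d) 0 > t.foldl max w
                    then PySem.List.pyGetD nums (k + d) 0 else t.foldl max w) := by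
          rw [hwv, hw, maxI_cons]
          simp only [maxI]
        have h3 := main _ _ h1 h2
        simpa only [outerB, minI, maxI] using h3

-- A's double loop is: last i that has a valid j, with its first valid j
lemma A_eq (nums : List Int) (d v : Int) :
    findIndices nums d v
      = match (PySem.List.pyRange 0 (nums.length : Int) 1).reverse.findSome?
          (fun i => (fA nums d v i).map (fun j => [i, j])) with
        | some r => r
        | none => [-1, -1] := by
  unfold findIndices
  have hcongr : (PySem.List.pyRange 0 (nums.length : Int) 1).foldl
        (fun ans i => innerA nums d v i ans (PySem.List.pyRange i (nums.length : Int) 1)) [-1, -1]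
      = (PySem.List.pyRange 0 (nums.length : Int) 1).foldl
        (fun ans i => match fA nums d v i with | some j => [i, j] | none => ans) [-1, -1] := by
    apply PySem.List.foldl_congr_mem
    intro ans i _
    simp only [innerA_eq, fA]
  rw [hcongr]
  exact foldl_pick (fA nums d v) (fun i j => [i, j]) _ _

-- A's per-i search equals B's: indices j < i+d fail A's index test, beyond it the tests agree
lemma fA_eq_fB (nums : List Int) (d0 v i : Int) (hi : 0 ≤ i) (hin : i < (nums.length : Int)) :
    fA nums d0 v i = fB nums (if d0 > 0 then d0 else 0) v i := by
  by_cases hd : d0 > 0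
  · rw [if_pos hd]
    by_cases hbig : (nums.length : Int) ≤ i + d0
    · rw [fB_none_of_empty _ _ _ _ hbig]
      unfold fA
      rw [List.find?_eq_none]
      intro j hj
      rw [PySem.List.mem_pyRange_one] at hj
      simp only [decide_eq_true_eq, not_and]
      intro hab
      exfalso
      rcases abs_cases (i - j) with ⟨he, _⟩ | ⟨he, _⟩ <;> omega
    · push_neg at hbig
      unfold fA fB
      rw [PySem.List.pyRange_one_append i (i + d0) (nums.length : Int) (by omega) (by omega),
        List.find?_append]
      have h1 : (PySem.List.pyRange i (i + d0) 1).find?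
          (fun j => decide (d0 ≤ |i - j| ∧ v ≤ |PySem.List.pyGetD nums i 0 - PySem.List.pyGetD nums j 0|)) = none := by
        rw [List.find?_eq_none]
        intro j hj
        rw [PySem.List.mem_pyRange_one] at hj
        simp only [decide_eq_true_eq, not_and]
        intro hab
        exfalso
        rcases abs_cases (i - j) with ⟨he, _⟩ | ⟨he, _⟩ <;> omega
      rw [h1, Option.none_or]
      apply find?_congr_mem
      intro j hj
      rw [PySem.List.mem_pyRange_one] at hj
      have : d0 ≤ |i - j| := by
        rcases abs_cases (i - j) with ⟨he, _⟩ | ⟨he, _⟩ <;> omega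
      simp [this]
  · rw [if_neg hd]
    push_neg at hd
    unfold fA fB
    rw [show i + 0 = i by ring]
    apply find?_congr_mem
    intro j hj
    rw [PySem.List.mem_pyRange_one] at hj
    have : d0 ≤ |i - j| := by
      rcases abs_cases (i - j) with ⟨he, _⟩ | ⟨he, _⟩ <;> omega
    simp [this]

-- ===== VERDICT (by name: the statement is the Claim_ definition above) =====
theorem findIndices_spec : Claim_equal_findIndices := by
  intro nums d0 v _
  unfold Spec_findIndices
  set n : Int := (nums.length : Int) with hn
  have hn0 : 0 ≤ n := by positivity
  set d : Int := if d0 > 0 then d0 else 0 with hd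
  have hd0 : 0 ≤ d := by rw [hd]; split_ifs <;> omega
  -- A as a reverse search with B's per-index test
  have hA : findIndices nums d0 v
      = match (PySem.List.pyRange 0 n 1).reverse.findSome?
          (fun i => (fB nums d v i).map (fun j => [i, j])) with
        | some r => r
        | none => [-1, -1] := by
    rw [A_eq]
    rw [findSome?_congr_mem _ _ (fun i => (fB nums d v i).map (fun j => [i, j]))
      (by
        intro i hi
        rw [List.mem_reverse, PySem.List.mem_pyRange_one] at hi
        rw [fA_eq_fB nums d0 v i hi.1 hi.2, ← hd])]
  -- drop the indices i with i + d ≥ n (their fB is none)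
  have hdrop : (PySem.List.pyRange 0 n 1).reverse.findSome?
        (fun i => (fB nums d v i).map (fun j => [i, j]))
      = (PySem.List.pyRange (n - 1 - d) (-1) (-1)).findSome?
        (fun i => (fB nums d v i).map (fun j => [i, j])) := by
    by_cases hnd : n - d ≤ 0
    · rw [PySem.List.pyRange_neg_one_eq_nil (by omega)]
      rw [List.findSome?_eq_none_iff.mpr]
      · rfl
      · intro i hi
        rw [List.mem_reverse, PySem.List.mem_pyRange_one] at hi
        rw [fB_none_of_empty nums d v i (by omega)]
        rfl
    · push_neg at hnd
      rw [PySem.List.pyRange_one_append 0 (n - d) n (by omega) (by omega),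
        List.reverse_append, List.findSome?_append]
      have h1 : (PySem.List.pyRange (n - d) n 1).reverse.findSome?
          (fun i => (fB nums d v i).map (fun j => [i, j])) = none := by
        rw [List.findSome?_eq_none_iff]
        intro i hi
        rw [List.mem_reverse, PySem.List.mem_pyRange_one] at hi
        rw [fB_none_of_empty nums d v i (by omega)]
        rfl
      rw [h1, Option.none_or]
      congr 1
      rw [PySem.List.pyRange_neg_one_eq_reverse]
      congr 2
      omega
  -- B is that same reverse search
  have hB : findIndices_alt nums d0 v
      = match (PySem.List.pyRange (n - 1 - d) (-1) (-1)).findSome?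
          (fun i => (fB nums d v i).map (fun j => [i, j])) with
        | some r => r
        | none => [-1, -1] := by
    unfold findIndices_alt
    rw [← hd, ← hn]
    have hwnil : wv nums d (n - 1 - d + 1) = [] := by
      unfold wv
      rw [show n - 1 - d + 1 + d = n by ring, ← hn, PySem.List.pyRange_one_eq_nil (by omega)]
      rfl
    have h0 := outerB_eq nums d v ((n - 1 - d) + 1).toNat (n - 1 - d) le_rfl (by rw [← hn]; omega)
    rw [hwnil] at h0
    exact h0
  rw [hA, hB, hdrop]
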